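-- pv_equiv track=rewrite | github.com/JohnnySunUmich/SQL_Testing | src/constraint_based/utils/type_convertion.py | int2date
-- ===== SOURCE A (Python) =====
-- month_date = [31,28,31,30,31,30,31,31,30,31,30,31]
--
-- def int2date(n: int):
--     n = -n if n < 0 else n
--     year = n // 365
--     if year < 1000:
--         year += 1000
--     year = str(year)
--     rmdr = n % 365
--     for i, md in enumerate(month_date):
--         if rmdr > md:
--             rmdr -= md
--         else:
--             month = i+1
--             day = rmdr+1
--             if day > month_date[month-1]:
--                 day = 1
--                 month += 1
--             break
--     return f'{year}-{month}-{day}'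
-- ===== SOURCE B (Python) =====
-- month_date = [31,28,31,30,31,30,31,31,30,31,30,31]
--
-- _P = [0]
-- _s = 0
-- for _md in month_date:
--     _s += _md
--     _P.append(_s)
--
-- def int2date(n: int):
--     n = -n if n < 0 else n
--     year = n // 365
--     if year < 1000:
--         year += 1000
--     rmdr = n % 365
--     i = 1
--     while rmdr >= _P[i]:
--         i += 1
--     return f'{year}-{i}-{rmdr - _P[i-1] + 1}'
-- ===== Notes on version B (the rewrite author's own statement) =====
-- stated objective: simpler
-- what changed: Replaces A's per-month conditional-subtraction loop with its day-overflow fix-up by a precomputed prefix-sum table of month lengths scanned once for the first cumulative total exceeding the remainder, so month and day come from a single table lookup.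
import Mathlib
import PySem

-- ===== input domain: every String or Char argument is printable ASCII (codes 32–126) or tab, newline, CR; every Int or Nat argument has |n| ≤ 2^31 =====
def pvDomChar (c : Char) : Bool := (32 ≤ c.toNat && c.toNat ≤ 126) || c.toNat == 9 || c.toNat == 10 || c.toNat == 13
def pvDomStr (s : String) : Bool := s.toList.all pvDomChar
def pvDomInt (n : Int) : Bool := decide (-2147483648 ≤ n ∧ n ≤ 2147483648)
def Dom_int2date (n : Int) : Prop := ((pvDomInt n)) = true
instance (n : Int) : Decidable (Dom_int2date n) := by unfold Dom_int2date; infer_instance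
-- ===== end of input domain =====

-- B replaces A's conditional-subtraction month loop (with its day-overflow fix-up) by a
-- single scan of a precomputed prefix-sum table of month_date; objective: simpler.

-- ===== PORT A =====
def monthDate : List Int := [31,28,31,30,31,30,31,31,30,31,30,31]

-- the `for i, md in enumerate(month_date)` loop with its `break`; returns (month, day).
-- Python leaves month/day unbound when the loop runs off the end (NameError); that branch
-- is unreachable for 0 ≤ rmdr < 365, ported as (0, 0).
def int2dateLoop : Int → List (Int × Int) → Int × Int
  | _, [] => (0, 0)
  | rmdr, (i, md) :: rest =>
    if rmdr > md then int2dateLoop (rmdr - md) rest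
    else
      let month := i + 1
      let day := rmdr + 1
      -- month_date[month-1] = month_date[i] = md (the element already in hand)
      if day > md then (month + 1, 1) else (month, day)

def int2date (n : Int) : String :=
  let n := if n < 0 then -n else n
  let year := PySem.Int.floordiv n 365
  let year := if year < 1000 then year + 1000 else year
  let yearS := PySem.Int.toStr year
  let rmdr := PySem.Int.mod n 365
  let md := int2dateLoop rmdr (PySem.List.enumerate monthDate)
  yearS ++ "-" ++ PySem.Int.toStr md.1 ++ "-" ++ PySem.Int.toStr md.2

-- ===== PORT B =====
-- module-level table _P: prefix sums of month_date, built by a running-sum loop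
def altPrefix : List Int :=
  (monthDate.foldl (fun (st : List Int × Int) md =>
    (st.1 ++ [st.2 + md], st.2 + md)) ([0], 0)).1

-- the `i = 1; while rmdr >= _P[i]: i += 1` loop, walking _P[1:] and carrying _P[i-1];
-- returns (i, rmdr - _P[i-1] + 1).  Python would IndexError off the end (unreachable
-- for 0 ≤ rmdr < 365); ported by returning at the empty list.
def altScan : Int → Int → Int → List Int → Int × Int
  | rmdr, prev, i, [] => (i, rmdr - prev + 1)
  | rmdr, prev, i, p :: rest =>
    if rmdr ≥ p then altScan rmdr p (i + 1) rest
    else (i, rmdr - prev + 1)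

def int2date_alt (n : Int) : String :=
  let n := if n < 0 then -n else n
  let year := PySem.Int.floordiv n 365
  let year := if year < 1000 then year + 1000 else year
  let rmdr := PySem.Int.mod n 365
  let md := altScan rmdr 0 1 (altPrefix.drop 1)
  PySem.Int.toStr year ++ "-" ++ PySem.Int.toStr md.1 ++ "-" ++ PySem.Int.toStr md.2

-- ===== PRECONDITION & SPEC =====
def Spec_int2date (n : Int) (out : String) : Prop := out = int2date_alt n
instance (n : Int) (out : String) : Decidable (Spec_int2date n out) := by unfold Spec_int2date; infer_instance

-- ===== CLAIM (what is proved, stated in full; the proofs are below) =====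
def Claim_equal_int2date : Prop := ∀ (n : Int), Dom_int2date n → Spec_int2date n (int2date n)

-- ===== LEMMAS AND PROOFS =====

-- The two month/day computations agree for every remainder 0 ≤ r < 365.
set_option maxRecDepth 8192 in
lemma loop_eq_scan : ∀ k : Fin 365,
    int2dateLoop (k : Int) (PySem.List.enumerate monthDate)
      = altScan (k : Int) 0 1 (altPrefix.drop 1) := by decide

lemma loop_eq_scan' (r : Int) (h0 : 0 ≤ r) (h1 : r < 365) :
    int2dateLoop r (PySem.List.enumerate monthDate)
      = altScan r 0 1 (altPrefix.drop 1) := by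
  have hk : r.toNat < 365 := by omega
  have := loop_eq_scan ⟨r.toNat, hk⟩
  simpa [Int.toNat_of_nonneg h0] using this

-- ===== VERDICT (by name: the statement is the Claim_ definition above) =====
theorem int2date_spec : Claim_equal_int2date := by
  intro n _
  unfold Spec_int2date int2date int2date_alt
  have h0 : (0:Int) ≤ PySem.Int.mod (if n < 0 then -n else n) 365 :=
    PySem.Int.mod_nonneg _ (by norm_num)
  have h1 : PySem.Int.mod (if n < 0 then -n else n) 365 < 365 :=
    PySem.Int.mod_lt _ (by norm_num)
  simp only [loop_eq_scan' _ h0 h1]
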